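-- pv_equiv track=rewrite | github.com/RNA4219/katamari-documents | third_party/Day8/workflow-cookbook/tools/ci/check_governance_gate.py | _generate_pattern_variants
-- ===== SOURCE A (Python) =====
-- def _generate_pattern_variants(pattern: str) -> tuple[str, ...]:
--     variants: list[str] = [pattern]
--     stripped = pattern
--     while stripped.startswith("**/"):
--         stripped = stripped[3:]
--         if not stripped:
--             break
--         if stripped not in variants:
--             variants.append(stripped)
--         else:
--             break
--     return tuple(variants)
-- ===== SOURCE B (Python) =====
-- def _count_leading(pattern):
--     # number of leading "**/" groups, by recursion on 3-char slices
--     return 1 + _count_leading(pattern[3:]) if pattern.startswith("**/") else 0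
--
--
-- def _generate_pattern_variants(pattern: str) -> tuple[str, ...]:
--     k = _count_leading(pattern)
--     return (pattern,) + tuple(
--         s for j in range(k) if (s := pattern[3 * (j + 1):])
--     )
-- ===== Notes on version B (the rewrite author's own statement) =====
-- stated objective: alternative
-- what changed: B first counts the leading double-star-slash groups by recursion, then builds the result in one comprehension over slice offsets, replacing A's while-loop with its growing variants list and its dead membership-test break branch.
import Mathlib
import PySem

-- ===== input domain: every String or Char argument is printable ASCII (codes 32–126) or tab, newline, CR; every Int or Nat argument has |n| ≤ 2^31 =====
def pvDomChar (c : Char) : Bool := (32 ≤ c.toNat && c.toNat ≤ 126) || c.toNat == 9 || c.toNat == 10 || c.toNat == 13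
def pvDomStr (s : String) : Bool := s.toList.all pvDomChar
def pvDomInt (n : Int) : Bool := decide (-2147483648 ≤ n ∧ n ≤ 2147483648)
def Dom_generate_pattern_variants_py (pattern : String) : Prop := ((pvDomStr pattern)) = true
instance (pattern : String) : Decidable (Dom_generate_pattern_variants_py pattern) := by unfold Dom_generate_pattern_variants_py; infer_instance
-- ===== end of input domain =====

-- B computes the number of leading "**/" groups first, then emits all non-empty suffixes in one
-- pass (alternative decomposition; same exact return value as A).


-- ===== PORT A =====
-- A's while loop over `stripped`, as structural recursion on the character list.
-- Exactness notes: `stripped.startswith("**/")` is matching the first three characters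
-- '*' '*' '/' of the list, and `stripped[3:]` is the remaining list `rest`; `not stripped`
-- is `rest = []`; `stripped not in variants` is list membership.
def pvStripLoopA (variants : List (List Char)) (stripped : List Char) : List (List Char) :=
  match stripped with
  | '*' :: '*' :: '/' :: rest =>
      if rest = [] then variants
      else if rest ∈ variants then variants
      else pvStripLoopA (variants ++ [rest]) rest
  | _ => variants

def generate_pattern_variants_py (pattern : String) : List String :=
  (pvStripLoopA [pattern.toList] pattern.toList).map (fun cs => String.ofList cs)

-- ===== PORT B =====
-- B's `_count_leading`: recursion stripping "**/" three characters at a time.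
def pvCountLeading (cs : List Char) : Nat :=
  match cs with
  | '*' :: '*' :: '/' :: rest => 1 + pvCountLeading rest
  | _ => 0

-- B's comprehension: `(pattern,) + tuple(s for j in range(k) if (s := pattern[3*(j+1):]))`
-- (the `if s` truthiness filter is the `s ≠ []` test of filterMap).
def generate_pattern_variants_py_alt (pattern : String) : List String :=
  let l := pattern.toList
  let k := pvCountLeading l
  pattern :: (List.range k).filterMap (fun j =>
    let s := l.drop (3 * (j + 1))
    if s = [] then none else some (String.ofList s))

-- ===== PRECONDITION & SPEC =====
def Spec_generate_pattern_variants_py (pattern : String) (out : List String) : Prop := out = generate_pattern_variants_py_alt pattern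
instance (pattern : String) (out : List String) : Decidable (Spec_generate_pattern_variants_py pattern out) := by unfold Spec_generate_pattern_variants_py; infer_instance

-- ===== CLAIM (what is proved, stated in full; the proofs are below) =====
def Claim_equal_generate_pattern_variants_py : Prop := ∀ (pattern : String), Dom_generate_pattern_variants_py pattern → Spec_generate_pattern_variants_py pattern (generate_pattern_variants_py pattern)

-- ===== LEMMAS AND PROOFS =====

-- Canonical description of the suffix variants A's loop appends after the initial pattern.
def pvTailVariants (cs : List Char) : List (List Char) :=
  match cs with
  | '*' :: '*' :: '/' :: rest => if rest = [] then [] else rest :: pvTailVariants rest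
  | _ => []

-- A's loop, under the invariant that every accumulated variant is at least as long as the
-- current `stripped` (so the dead `rest ∈ variants` branch never fires), just appends
-- pvTailVariants.
theorem pvStripLoopA_eq (cs : List Char) : ∀ (vs : List (List Char)),
    (∀ v ∈ vs, cs.length ≤ v.length) →
    pvStripLoopA vs cs = vs ++ pvTailVariants cs := by
  induction cs using pvTailVariants.induct
  case case1 =>
    intro vs _
    simp [pvStripLoopA, pvTailVariants]
  case case2 rest hne ih =>
    intro vs hinv
    have hmem : rest ∉ vs := by
      intro h
      have := hinv rest h
      simp at this; omega
    have hinv' : ∀ v ∈ vs ++ [rest], rest.length ≤ v.length := by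
      intro v hv
      rcases List.mem_append.1 hv with h | h
      · have := hinv v h; simp at this ⊢; omega
      · simp_all
    rw [pvStripLoopA, if_neg hne, if_neg hmem,
      ih (vs ++ [rest]) hinv', pvTailVariants, if_neg hne]
    simp
  case case3 t x =>
    intro vs _
    rw [pvStripLoopA.eq_def]
    split
    · exact absurd rfl (x _)
    · rw [pvTailVariants.eq_def]
      split
      · exact absurd rfl (x _)
      · simp

-- B's count-then-slice construction produces exactly the same suffix list.
theorem pvTailVariants_eq (cs : List Char) :
    pvTailVariants cs = (List.range (pvCountLeading cs)).filterMap (fun j =>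
      let s := cs.drop (3 * (j + 1))
      if s = [] then none else some s) := by
  induction cs using pvTailVariants.induct
  case case1 => decide
  case case2 rest hne ih =>
    rw [pvTailVariants, if_neg hne, pvCountLeading, Nat.add_comm 1 (pvCountLeading rest),
      List.range_succ_eq_map]
    simp only [List.filterMap_cons, List.filterMap_map, Function.comp]
    have h0 : List.drop (3 * (0 + 1)) ('*' :: '*' :: '/' :: rest) = rest := rfl
    rw [h0, if_neg hne, ih]
    show _ :: _ = _ :: _
    congr 1
  case case3 t x =>
    rw [pvTailVariants.eq_def]
    split
    · exact absurd rfl (x _)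
    · rw [pvCountLeading.eq_def]
      split
      · exact absurd rfl (x _)
      · simp

-- ===== VERDICT (by name: the statement is the Claim_ definition above) =====
theorem generate_pattern_variants_py_spec : Claim_equal_generate_pattern_variants_py := by
  intro pattern _
  unfold Spec_generate_pattern_variants_py generate_pattern_variants_py
    generate_pattern_variants_py_alt
  rw [pvStripLoopA_eq pattern.toList [pattern.toList] (by simp), pvTailVariants_eq]
  simp only [List.map_append, List.map_cons, List.map_nil, List.map_filterMap,
    String.ofList_toList]
  rw [List.cons_append, List.nil_append]
  congr 1
  apply List.filterMap_congr
  intro j _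
  split <;> simp
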